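-- pv_equiv track=rewrite | github.com/rgrannell1/mirror | labeller/things/trips.py | _trip_sections
-- ===== SOURCE A (Python) =====
-- from collections.abc import Iterator
--
-- _NumberedLines = list[tuple[int, str]]
--
-- def _trip_sections(lines: list[str]) -> Iterator[_NumberedLines]:
--     """Yield the body lines (with line numbers) for each [[trips]] block."""
--     current: _NumberedLines = []
--     in_trips = False
--
--     for line_num, line in enumerate(lines, 1):
--         stripped = line.strip()
--         if stripped == "[[trips]]":
--             if current:
--                 yield current
--             current = []
--             in_trips = True
--         elif in_trips and stripped.startswith("[["):
--             if current:
--                 yield current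
--             current = []
--             in_trips = False
--         elif in_trips:
--             current.append((line_num, line))
--
--     if current:
--         yield current
-- ===== SOURCE B (Python) =====
-- def _trip_sections(lines):
--     """Yield the body lines (with line numbers) for each [[trips]] block.
--
--     Two-pass: first index every section boundary (any line whose stripped
--     text starts with '[['), then slice each [[trips]] block out directly.
--     """
--     numbered = list(enumerate(lines, 1))
--     cuts = [(k, line) for k, (_, line) in enumerate(numbered)
--             if line.strip().startswith("[[")]
--     ends = [k for k, _ in cuts][1:] + [len(numbered)]
--     for (c, line), nxt in zip(cuts, ends):
--         if line.strip() == "[[trips]]":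
--             body = numbered[c + 1:nxt]
--             if body:
--                 yield body
-- ===== Notes on version B (the rewrite author's own statement) =====
-- stated objective: alternative
-- what changed: Replaces the stateful in_trips/current scan with a two-pass design: one pass indexes every section boundary line, a second pass slices each [[trips]] block out of the numbered lines between its header and the next boundary.
import Mathlib
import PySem

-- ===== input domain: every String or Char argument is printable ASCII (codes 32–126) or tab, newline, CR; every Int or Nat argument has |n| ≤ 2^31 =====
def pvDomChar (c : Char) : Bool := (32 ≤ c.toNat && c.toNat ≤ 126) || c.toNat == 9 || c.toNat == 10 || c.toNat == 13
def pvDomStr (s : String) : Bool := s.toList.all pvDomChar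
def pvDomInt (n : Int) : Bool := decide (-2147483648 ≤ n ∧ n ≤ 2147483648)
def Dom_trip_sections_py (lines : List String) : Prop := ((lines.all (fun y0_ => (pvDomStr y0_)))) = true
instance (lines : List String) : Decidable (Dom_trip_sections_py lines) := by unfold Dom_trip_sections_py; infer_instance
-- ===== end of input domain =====

-- B replaces A's stateful in_trips/current scan by a boundary-index pass plus slicing; same return value, no speed claim.

-- ===== PORT A =====
-- one step of A's for-loop; state = (yielded blocks so far, current, in_trips)
def tripStepA (st : List (List (Int × String)) × List (Int × String) × Bool)
    (p : Int × String) : List (List (Int × String)) × List (Int × String) × Bool :=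
  let stripped := PySem.Str.strip p.2
  if stripped = "[[trips]]" then
    ((if st.2.1 ≠ [] then st.1 ++ [st.2.1] else st.1), [], true)
  else if st.2.2 && PySem.Str.startswith stripped "[[" then
    ((if st.2.1 ≠ [] then st.1 ++ [st.2.1] else st.1), [], false)
  else if st.2.2 then
    (st.1, st.2.1 ++ [(p.1, p.2)], st.2.2)
  else st

def trip_sections_py (lines : List String) : List (List (Int × String)) :=
  let st := (PySem.List.enumerate lines 1).foldl tripStepA ([], [], false)
  st.1 ++ (if st.2.1 ≠ [] then [st.2.1] else [])

-- ===== PORT B =====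
-- B's second pass, a function of the numbered lines (Python's `numbered`)
def tripPipeB (numbered : List (Int × String)) : List (List (Int × String)) :=
  let cuts := ((PySem.List.enumerate numbered 0).filter
      (fun q => PySem.Str.startswith (PySem.Str.strip q.2.2) "[[")).map
      (fun q => (q.1, q.2.2))
  let ends := PySem.List.slice (cuts.map (fun q => q.1)) (some 1) none ++ [(numbered.length : Int)]
  (cuts.zip ends).foldl (fun acc q =>
    if PySem.Str.strip q.1.2 = "[[trips]]" then
      let body := PySem.List.slice numbered (some (q.1.1 + 1)) (some q.2)
      if body ≠ [] then acc ++ [body] else acc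
    else acc) []

def trip_sections_py_alt (lines : List String) : List (List (Int × String)) :=
  tripPipeB (PySem.List.enumerate lines 1)

-- ===== PRECONDITION & SPEC =====
def Spec_trip_sections_py (lines : List String) (out : List (List (Int × String))) : Prop := out = trip_sections_py_alt lines
instance (lines : List String) (out : List (List (Int × String))) : Decidable (Spec_trip_sections_py lines out) := by unfold Spec_trip_sections_py; infer_instance

-- ===== CLAIM (what is proved, stated in full; the proofs are below) =====
def Claim_equal_trip_sections_py : Prop := ∀ (lines : List String), Dom_trip_sections_py lines → Spec_trip_sections_py lines (trip_sections_py lines)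

-- ===== LEMMAS AND PROOFS =====

-- a "non-boundary" numbered line: its stripped text does not start with "[["
def nbq (q : Int × String) : Bool := !(PySem.Str.startswith (PySem.Str.strip q.2) "[[")

-- reference recursion both programs are reduced to: for each [[trips]] header,
-- emit the non-boundary lines that follow it (if any)
def Bcore : List (Int × String) → List (List (Int × String))
  | [] => []
  | p :: ns =>
    (if PySem.Str.strip p.2 = "[[trips]]" then
      (if ns.takeWhile nbq ≠ [] then [ns.takeWhile nbq] else [])
     else []) ++ Bcore ns

def cutsOf (ns : List (Int × String)) : List (Int × String) :=
  ((PySem.List.enumerate ns 0).filter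
      (fun q => PySem.Str.startswith (PySem.Str.strip q.2.2) "[[")).map
      (fun q => (q.1, q.2.2))

def endsOf (ns : List (Int × String)) : List Int :=
  ((cutsOf ns).map (fun q => q.1)).tail ++ [(ns.length : Int)]

def pairsOf (ns : List (Int × String)) : List ((Int × String) × Int) :=
  (cutsOf ns).zip (endsOf ns)

def G (ns : List (Int × String)) (q : (Int × String) × Int) : List (List (Int × String)) :=
  if PySem.Str.strip q.1.2 = "[[trips]]" then
    (if PySem.List.slice ns (some (q.1.1 + 1)) (some q.2) ≠ [] then
      [PySem.List.slice ns (some (q.1.1 + 1)) (some q.2)] else [])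
  else []

def shiftPair (q : (Int × String) × Int) : (Int × String) × Int := ((q.1.1 + 1, q.1.2), q.2 + 1)

lemma trips_bd {l : String} (h : PySem.Str.strip l = "[[trips]]") :
    PySem.Str.startswith (PySem.Str.strip l) "[[" = true := by
  rw [h]; decide

-- the same boundary test in the Chars normal form simp produces
lemma bd_chars_of {s : String} {b : Bool}
    (h : PySem.Str.startswith (PySem.Str.strip s) "[[" = b) :
    PySem.Chars.startswith (PySem.Chars.strip s.toList) ['[', '['] = b := by
  simpa using h

lemma tripPipeB_eq (ns : List (Int × String)) :
    tripPipeB ns = (pairsOf ns).flatMap (G ns) := by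
  show (List.foldl _ [] _) = _
  rw [PySem.List.foldl_congr_mem _ _ (fun acc q => acc ++ G ns q) []
    (by
      intro acc q _
      simp only [G]
      split_ifs <;> simp_all)]
  rw [PySem.List.foldl_append_eq_flatMap]
  simp only [pairsOf, endsOf, cutsOf, PySem.List.slice_from_one, List.nil_append]

lemma enum_shift {α : Type} (xs : List α) (s : Int) :
    PySem.List.enumerate xs (s + 1) = (PySem.List.enumerate xs s).map (fun q => (q.1 + 1, q.2)) := by
  induction xs generalizing s with
  | nil => simp [PySem.List.enumerate]
  | cons x xs ih => simp [PySem.List.enumerate_cons, ih]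

lemma cuts_cons (p : Int × String) (ns : List (Int × String)) :
    cutsOf (p :: ns) =
      (if PySem.Str.startswith (PySem.Str.strip p.2) "[[" then [((0 : Int), p.2)] else [])
        ++ (cutsOf ns).map (fun q => (q.1 + 1, q.2)) := by
  simp only [cutsOf, PySem.List.enumerate_cons, enum_shift, List.filter_cons]
  by_cases h : PySem.Chars.startswith (PySem.Chars.strip p.2.toList) ['[', '['] = true <;>
    simp [h, List.filter_map, List.map_map, Function.comp_def]

lemma cuts_nonneg (ns : List (Int × String)) : ∀ q ∈ cutsOf ns, 0 ≤ q.1 := by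
  induction ns with
  | nil => simp [cutsOf, PySem.List.enumerate]
  | cons p ns ih =>
    intro q hq
    rw [cuts_cons] at hq
    rcases List.mem_append.1 hq with h | h
    · split_ifs at h <;> simp_all
    · obtain ⟨r, hr, rfl⟩ := List.mem_map.1 h
      have := ih r hr
      simp only
      omega

lemma ends_nonneg (ns : List (Int × String)) : ∀ e ∈ endsOf ns, 0 ≤ e := by
  intro e he
  rcases List.mem_append.1 he with h | h
  · obtain ⟨r, hr, rfl⟩ := List.mem_map.1 (List.mem_of_mem_tail h)
    exact cuts_nonneg ns r hr
  · simp only [List.mem_singleton] at h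
    omega

lemma pairs_nonneg (ns : List (Int × String)) :
    ∀ q ∈ pairsOf ns, 0 ≤ q.1.1 ∧ 0 ≤ q.2 := by
  intro q hq
  obtain ⟨h1, h2⟩ := List.of_mem_zip hq
  exact ⟨cuts_nonneg ns _ h1, ends_nonneg ns _ h2⟩

lemma slice_cons_shift {α : Type} (x : α) (xs : List α) {a b : Int}
    (ha : 0 ≤ a) (hb : 0 ≤ b) :
    PySem.List.slice (x :: xs) (some (a + 1)) (some (b + 1)) =
      PySem.List.slice xs (some a) (some b) := by
  rw [PySem.List.slice_toNat _ (by omega) (by omega), PySem.List.slice_toNat _ ha hb]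
  have ha1 : (a + 1).toNat = a.toNat + 1 := by omega
  have hb1 : (b + 1).toNat = b.toNat + 1 := by omega
  rw [ha1, hb1, List.drop_succ_cons]
  congr 1
  omega

lemma G_shift (p : Int × String) (ns : List (Int × String))
    {q : (Int × String) × Int} (h1 : 0 ≤ q.1.1) (h2 : 0 ≤ q.2) :
    G (p :: ns) (shiftPair q) = G ns q := by
  simp only [G, shiftPair]
  rw [slice_cons_shift p ns (a := q.1.1 + 1) (by omega) h2]

lemma flatMap_pairs_shift (p : Int × String) (ns : List (Int × String)) :
    ((pairsOf ns).map shiftPair).flatMap (G (p :: ns)) =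
      (pairsOf ns).flatMap (G ns) := by
  rw [List.flatMap_map]
  apply List.flatMap_congr
  intro q hq
  obtain ⟨h1, h2⟩ := pairs_nonneg ns q hq
  exact G_shift p ns h1 h2

-- the shifted cuts of ns, zipped against their own shifted fst-tail extended by length+1,
-- are the shifted pairs of ns
lemma zip_shift_core (ns : List (Int × String)) :
    ((cutsOf ns).map (fun q => (q.1 + 1, q.2))).zip
        ((((cutsOf ns).map (fun q => (q.1 + 1, q.2))).map (fun q => q.1)).tail
            ++ [(ns.length : Int) + 1]) =
      (pairsOf ns).map shiftPair := by
  have h1 : ((cutsOf ns).map (fun q => (q.1 + 1, q.2))).map (fun q : Int × String => q.1)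
      = ((cutsOf ns).map (fun q => q.1)).map (fun x => x + 1) := by
    simp [List.map_map, Function.comp_def]
  have h2 : ((((cutsOf ns).map (fun q => q.1)).map (fun x => x + 1)).tail
        ++ [(ns.length : Int) + 1])
      = (endsOf ns).map (fun x => x + 1) := by
    simp [endsOf, List.map_tail]
  rw [h1, h2]
  have h3 : (pairsOf ns).map shiftPair
      = (pairsOf ns).map
          (Prod.map (fun q : Int × String => (q.1 + 1, q.2)) (fun e : Int => e + 1)) := by
    apply List.map_congr_left
    intro q _
    rfl
  rw [h3, pairsOf, ← List.zip_map]

lemma pairs_cons_nb (p : Int × String) (ns : List (Int × String))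
    (h : PySem.Str.startswith (PySem.Str.strip p.2) "[[" = false) :
    pairsOf (p :: ns) = (pairsOf ns).map shiftPair := by
  have hc : cutsOf (p :: ns) = (cutsOf ns).map (fun q => (q.1 + 1, q.2)) := by
    rw [cuts_cons, h]; simp
  have hlen : (((p :: ns).length : Int)) = (ns.length : Int) + 1 := by
    simp
  rw [pairsOf, endsOf, hc, hlen, zip_shift_core]

lemma pairs_cons_bd_nil (p : Int × String) (ns : List (Int × String))
    (h : PySem.Str.startswith (PySem.Str.strip p.2) "[[" = true)
    (h0 : cutsOf ns = []) :
    pairsOf (p :: ns) = [(((0 : Int), p.2), (ns.length : Int) + 1)] := by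
  have hc : cutsOf (p :: ns) = [((0 : Int), p.2)] := by
    rw [cuts_cons, h, h0]; simp
  have hlen : (((p :: ns).length : Int)) = (ns.length : Int) + 1 := by simp
  rw [pairsOf, endsOf, hc, hlen]
  simp

lemma pairs_cons_bd_cons (p : Int × String) (ns : List (Int × String))
    {c : Int × String} {rest : List (Int × String)}
    (h : PySem.Str.startswith (PySem.Str.strip p.2) "[[" = true)
    (h0 : cutsOf ns = c :: rest) :
    pairsOf (p :: ns) = (((0 : Int), p.2), c.1 + 1) :: (pairsOf ns).map shiftPair := by
  have hc : cutsOf (p :: ns) = ((0 : Int), p.2) :: (cutsOf ns).map (fun q => (q.1 + 1, q.2)) := by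
    rw [cuts_cons, h]; simp
  have hlen : (((p :: ns).length : Int)) = (ns.length : Int) + 1 := by simp
  have h4 := zip_shift_core ns
  conv_lhs at h4 => rw [h0]
  simp only [List.map_cons, List.tail_cons] at h4
  rw [pairsOf, endsOf, hc, hlen, h0]
  simp only [List.map_cons, List.tail_cons]
  exact congrArg₂ List.cons rfl h4

lemma takeWhile_of_cuts_nil {ns : List (Int × String)} (h : cutsOf ns = []) :
    ns.takeWhile nbq = ns := by
  induction ns with
  | nil => rfl
  | cons p ns ih =>
    rw [cuts_cons] at h
    rcases List.append_eq_nil_iff.1 h with ⟨h1, h2⟩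
    have hbd : PySem.Str.startswith (PySem.Str.strip p.2) "[[" = false := by
      by_contra hc
      rw [if_pos (by simpa using hc)] at h1
      exact List.cons_ne_nil _ _ h1
    rw [List.takeWhile_cons_of_pos (by simp [nbq, bd_chars_of hbd]), ih (List.map_eq_nil_iff.1 h2)]

lemma Bcore_of_cuts_nil {ns : List (Int × String)} (h : cutsOf ns = []) :
    Bcore ns = [] := by
  induction ns with
  | nil => rfl
  | cons p ns ih =>
    rw [cuts_cons] at h
    rcases List.append_eq_nil_iff.1 h with ⟨h1, h2⟩
    have hbd : PySem.Str.startswith (PySem.Str.strip p.2) "[[" = false := by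
      by_contra hc
      rw [if_pos (by simpa using hc)] at h1
      exact List.cons_ne_nil _ _ h1
    have ht : ¬ PySem.Str.strip p.2 = "[[trips]]" := fun hc => by
      rw [trips_bd hc] at hbd; cases hbd
    rw [Bcore, if_neg ht, List.nil_append, ih (List.map_eq_nil_iff.1 h2)]

lemma take_fst_of_cuts_cons {ns : List (Int × String)} {c : Int × String}
    {rest : List (Int × String)} (h : cutsOf ns = c :: rest) :
    ns.take c.1.toNat = ns.takeWhile nbq := by
  induction ns generalizing c rest with
  | nil => simp [cutsOf, PySem.List.enumerate] at h
  | cons p ns ih =>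
    rw [cuts_cons] at h
    by_cases hbd : PySem.Str.startswith (PySem.Str.strip p.2) "[[" = true
    · rw [if_pos (by simpa using hbd), List.singleton_append, List.cons.injEq] at h
      rw [← h.1]
      rw [List.takeWhile_cons_of_neg (by simp [nbq, bd_chars_of hbd])]
      rfl
    · rw [if_neg (by simpa using hbd), List.nil_append] at h
      cases hx : cutsOf ns with
      | nil => rw [hx] at h; simp at h
      | cons c' rest' =>
        rw [hx, List.map_cons, List.cons.injEq] at h
        have h0 : 0 ≤ c'.1 := cuts_nonneg ns c' (hx ▸ List.mem_cons_self)
        have hbd' : PySem.Str.startswith (PySem.Str.strip p.2) "[[" = false :=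
          eq_false_of_ne_true hbd
        rw [List.takeWhile_cons_of_pos (by simp [nbq, bd_chars_of hbd']), ← h.1]
        have hn : ((c'.1 + 1 : Int)).toNat = c'.1.toNat + 1 := by omega
        simp only [hn]
        rw [List.take_succ_cons, ih hx]

lemma G_first_nil (p : Int × String) (ns : List (Int × String))
    (h0 : cutsOf ns = []) :
    G (p :: ns) (((0 : Int), p.2), (ns.length : Int) + 1) =
      if PySem.Str.strip p.2 = "[[trips]]" then
        (if ns.takeWhile nbq ≠ [] then [ns.takeWhile nbq] else [])
      else [] := by
  have hs : PySem.List.slice (p :: ns) (some ((0 : Int) + 1)) (some ((ns.length : Int) + 1))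
      = ns := by
    rw [PySem.List.slice_toNat _ (by omega) (by omega)]
    have : ((0 : Int) + 1).toNat = 1 := by omega
    rw [this]
    have : ((ns.length : Int) + 1).toNat = ns.length + 1 := by omega
    rw [this]
    simp
  simp only [G, hs, takeWhile_of_cuts_nil h0]

lemma G_first_cons (p : Int × String) (ns : List (Int × String))
    {c : Int × String} {rest : List (Int × String)} (h0 : cutsOf ns = c :: rest) :
    G (p :: ns) (((0 : Int), p.2), c.1 + 1) =
      if PySem.Str.strip p.2 = "[[trips]]" then
        (if ns.takeWhile nbq ≠ [] then [ns.takeWhile nbq] else [])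
      else [] := by
  have h0' : 0 ≤ c.1 := cuts_nonneg ns c (h0 ▸ List.mem_cons_self)
  have hs : PySem.List.slice (p :: ns) (some ((0 : Int) + 1)) (some (c.1 + 1))
      = ns.takeWhile nbq := by
    rw [PySem.List.slice_toNat _ (by omega) (by omega)]
    have h1 : ((0 : Int) + 1).toNat = 1 := by omega
    have h2 : ((c.1 + 1 : Int)).toNat = c.1.toNat + 1 := by omega
    rw [h1, h2]
    simp only [List.drop_one, List.tail_cons, Nat.add_sub_cancel]
    exact take_fst_of_cuts_cons h0
  simp only [G, hs]

lemma pipe_core (ns : List (Int × String)) :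
    (pairsOf ns).flatMap (G ns) = Bcore ns := by
  induction ns with
  | nil => rfl
  | cons p ns ih =>
    by_cases hbd : PySem.Str.startswith (PySem.Str.strip p.2) "[[" = true
    · cases hx : cutsOf ns with
      | nil =>
        rw [pairs_cons_bd_nil p ns hbd hx, List.flatMap_cons, List.flatMap_nil,
          List.append_nil, G_first_nil p ns hx, Bcore, Bcore_of_cuts_nil hx, List.append_nil]
      | cons c rest =>
        rw [pairs_cons_bd_cons p ns hbd hx, List.flatMap_cons, flatMap_pairs_shift, ih,
          G_first_cons p ns hx, Bcore]
    · have ht : ¬ PySem.Str.strip p.2 = "[[trips]]" := fun hc => by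
        rw [trips_bd hc] at hbd; exact hbd rfl
      rw [pairs_cons_nb p ns (eq_false_of_ne_true hbd), flatMap_pairs_shift, ih, Bcore,
        if_neg ht, List.nil_append]

-- A-side: finalization of the loop state
def finA (st : List (List (Int × String)) × List (Int × String) × Bool) :
    List (List (Int × String)) :=
  st.1 ++ (if st.2.1 ≠ [] then [st.2.1] else [])

lemma Bcore_dropWhile (ns : List (Int × String)) :
    Bcore (ns.dropWhile nbq) = Bcore ns := by
  induction ns with
  | nil => rfl
  | cons p ns ih =>
    by_cases hn : nbq p = true
    · have ht : ¬ PySem.Str.strip p.2 = "[[trips]]" := fun hc => by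
        simp [nbq, bd_chars_of (trips_bd hc)] at hn
      rw [List.dropWhile_cons_of_pos hn, ih, Bcore, if_neg ht, List.nil_append]
    · rw [List.dropWhile_cons_of_neg hn]

lemma loopA_spec (ns : List (Int × String)) :
    (∀ acc cur, finA (ns.foldl tripStepA (acc, cur, true)) =
        acc ++ (if cur ++ ns.takeWhile nbq ≠ [] then [cur ++ ns.takeWhile nbq] else [])
          ++ Bcore (ns.dropWhile nbq))
    ∧ (∀ acc, finA (ns.foldl tripStepA (acc, [], false)) = acc ++ Bcore ns) := by
  induction ns with
  | nil =>
    constructor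
    · intro acc cur
      simp [finA, Bcore]
    · intro acc
      simp [finA, Bcore]
  | cons p ns ih =>
    constructor
    · intro acc cur
      by_cases ht : PySem.Str.strip p.2 = "[[trips]]"
      · have hst : tripStepA (acc, cur, true) p =
            ((if cur ≠ [] then acc ++ [cur] else acc), [], true) := by
          simp [tripStepA, ht]
        have hnb : nbq p = false := by simp [nbq, bd_chars_of (trips_bd ht)]
        rw [List.foldl_cons, hst, (ih).1, List.takeWhile_cons_of_neg (by simp [hnb]),
          List.dropWhile_cons_of_neg (by simp [hnb]), Bcore, if_pos ht, Bcore_dropWhile]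
        simp only [List.nil_append, List.append_nil]
        by_cases hc : cur = [] <;> simp [hc, List.append_assoc]
      · by_cases hbd : PySem.Str.startswith (PySem.Str.strip p.2) "[[" = true
        · have hst : tripStepA (acc, cur, true) p =
              ((if cur ≠ [] then acc ++ [cur] else acc), [], false) := by
            simp [tripStepA, ht, bd_chars_of hbd]
          have hnb : nbq p = false := by simp [nbq, bd_chars_of hbd]
          rw [List.foldl_cons, hst, (ih).2, List.takeWhile_cons_of_neg (by simp [hnb]),
            List.dropWhile_cons_of_neg (by simp [hnb]), Bcore, if_neg ht]
          simp only [List.nil_append, List.append_nil]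
          by_cases hc : cur = [] <;> simp [hc, List.append_assoc]
        · have hst : tripStepA (acc, cur, true) p = (acc, cur ++ [(p.1, p.2)], true) := by
            simp [tripStepA, ht, bd_chars_of (eq_false_of_ne_true hbd)]
          have hnb : nbq p = true := by simp [nbq, bd_chars_of (eq_false_of_ne_true hbd)]
          rw [List.foldl_cons, hst, (ih).1, List.takeWhile_cons_of_pos hnb,
            List.dropWhile_cons_of_pos hnb]
          simp [List.append_assoc]
    · intro acc
      by_cases ht : PySem.Str.strip p.2 = "[[trips]]"
      · have hst : tripStepA (acc, [], false) p = (acc, [], true) := by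
          simp [tripStepA, ht]
        rw [List.foldl_cons, hst, (ih).1, Bcore, if_pos ht, Bcore_dropWhile]
        simp [List.append_assoc]
      · have hst : tripStepA (acc, [], false) p = (acc, [], false) := by
          simp [tripStepA, ht]
        rw [List.foldl_cons, hst, (ih).2, Bcore, if_neg ht, List.nil_append]

-- ===== VERDICT (by name: the statement is the Claim_ definition above) =====
theorem trip_sections_py_spec : Claim_equal_trip_sections_py := by
  intro lines _
  show trip_sections_py lines = trip_sections_py_alt lines
  rw [trip_sections_py_alt, tripPipeB_eq, pipe_core, trip_sections_py]
  exact (loopA_spec (PySem.List.enumerate lines 1)).2 []
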